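-- pv_equiv track=rewrite | github.com/pypi-data/pypi-mirror-399 | packages/eggai/eggai-0.2.9.tar.gz/eggai-0.2.9/cli/wizard.py | normalize_agent_name
-- ===== SOURCE A (Python) =====
-- def normalize_agent_name(name: str) -> str:
--     """Normalize agent name to proper CamelCase format with Agent suffix."""
--     if not name.strip():
--         return "Agent"
--
--     # Split on underscores and spaces, clean each part
--     parts = []
--     for part in name.replace("_", " ").split():
--         clean_part = "".join(c for c in part if c.isalnum())
--         if clean_part:
--             # Capitalize first letter, lowercase the rest
--             parts.append(clean_part[0].upper() + clean_part[1:].lower())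
--
--     if not parts:
--         return "Agent"
--
--     # Join parts for CamelCase
--     clean_name = "".join(parts)
--
--     # Add Agent suffix if not present
--     if not clean_name.endswith("Agent"):
--         clean_name += "Agent"
--
--     return clean_name
-- ===== SOURCE B (Python) =====
-- def normalize_agent_name(name: str) -> str:
--     """One-pass scan: '_'/whitespace delimit words, other non-alnum chars are dropped."""
--     out = []
--     start = True
--     for c in name:
--         if c == '_' or c.isspace():
--             start = True
--         elif c.isalnum():
--             out.append(c.upper() if start else c.lower())
--             start = False
--     s = ''.join(out)
--     if not s:
--         return "Agent"
--     return s if s.endswith("Agent") else s + "Agent"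
-- ===== Notes on version B (the rewrite author's own statement) =====
-- stated objective: alternative
-- what changed: Replaced A's replace-then-split-then-per-part-clean-and-capitalize pipeline by a single character-by-character scan that maintains a word-start flag and emits each kept character immediately.
import Mathlib
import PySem

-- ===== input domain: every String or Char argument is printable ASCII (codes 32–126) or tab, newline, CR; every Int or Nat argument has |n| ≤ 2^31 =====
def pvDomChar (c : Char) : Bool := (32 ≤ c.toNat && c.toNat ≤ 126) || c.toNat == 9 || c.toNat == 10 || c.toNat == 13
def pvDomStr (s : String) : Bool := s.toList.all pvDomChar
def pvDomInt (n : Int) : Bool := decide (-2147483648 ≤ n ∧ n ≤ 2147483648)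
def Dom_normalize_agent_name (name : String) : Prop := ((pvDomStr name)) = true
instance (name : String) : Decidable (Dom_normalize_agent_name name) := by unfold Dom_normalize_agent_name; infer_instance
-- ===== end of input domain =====

-- B is a one-pass scan with a word-start flag instead of A's replace/split/clean pipeline (alternative decomposition, same result).

-- ===== PORT A =====
def normalize_agent_name (name : String) : String :=
  if PySem.Str.strip name = "" then "Agent"
  else
    let parts := (PySem.Chars.split₀ (PySem.Chars.replace name.toList ['_'] [' '])).foldl
      (fun acc part =>
        let clean := part.filter PySem.Chars.isalnum
        if clean.isEmpty then acc
        else acc ++ [(clean.take 1).map PySem.Chars.upperChar ++ PySem.Chars.lower (clean.drop 1)]) []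
    if parts.isEmpty then "Agent"
    else
      let clean_name := PySem.Chars.join [] parts
      if PySem.Chars.endswith clean_name "Agent".toList then String.mk clean_name
      else String.mk (clean_name ++ "Agent".toList)

-- ===== PORT B =====
def normalize_agent_name_alt (name : String) : String :=
  let st := name.toList.foldl (fun (st : List Char × Bool) c =>
      if c == '_' || PySem.Chars.isspace c then (st.1, true)
      else if PySem.Chars.isalnum c then
        (st.1 ++ [if st.2 then PySem.Chars.upperChar c else PySem.Chars.lowerChar c], false)
      else st) ([], true)
  let s := st.1
  if s.isEmpty then "Agent"
  else if PySem.Chars.endswith s "Agent".toList then String.mk s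
  else String.mk (s ++ "Agent".toList)

-- ===== PRECONDITION & SPEC =====
def Spec_normalize_agent_name (name : String) (out : String) : Prop := out = normalize_agent_name_alt name
instance (name : String) (out : String) : Decidable (Spec_normalize_agent_name name out) := by unfold Spec_normalize_agent_name; infer_instance

-- ===== CLAIM (what is proved, stated in full; the proofs are below) =====
def Claim_equal_normalize_agent_name : Prop := ∀ (name : String), Dom_normalize_agent_name name → Spec_normalize_agent_name name (normalize_agent_name name)

-- ===== LEMMAS AND PROOFS =====

/-- '_' → ' ' substitution on one char. -/
def pvSub (c : Char) : Char := if c = '_' then ' ' else c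

/-- A's per-part cleanup+capitalization. -/
def pvCap (w : List Char) : List Char :=
  let clean := w.filter PySem.Chars.isalnum
  (clean.take 1).map PySem.Chars.upperChar ++ PySem.Chars.lower (clean.drop 1)

/-- Recursive form of B's scan. -/
def pvScan (start : Bool) : List Char → List Char
  | [] => []
  | c :: r =>
      if c == '_' || PySem.Chars.isspace c then pvScan true r
      else if PySem.Chars.isalnum c then
        (if start then PySem.Chars.upperChar c else PySem.Chars.lowerChar c) :: pvScan false r
      else pvScan start r

theorem pvReplaceGo (l : List Char) : ∀ (fuel : Nat) (acc : List Char), l.length ≤ fuel →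
    PySem.Chars.replace.go ['_'] [' '] fuel l acc = acc.reverse ++ l.map pvSub := by
  induction l with
  | nil => intro fuel acc _; cases fuel <;> simp [PySem.Chars.replace.go]
  | cons c t ih =>
    intro fuel acc h
    cases fuel with
    | zero => simp at h
    | succ f =>
      have ht : t.length ≤ f := by simpa using h
      simp only [PySem.Chars.replace.go]
      by_cases hc : c = '_'
      · subst hc
        have hpre : List.isPrefixOf ['_'] ('_' :: t) = true := by simp [List.isPrefixOf]
        simp [hpre, ih f _ ht, pvSub]
      · have hpre : List.isPrefixOf ['_'] (c :: t) = false := by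
          simp [List.isPrefixOf]; exact fun h' => (hc h'.symm).elim
        simp [hpre, ih f _ ht, pvSub, hc]

theorem pvReplaceEq (cs : List Char) :
    PySem.Chars.replace cs ['_'] [' '] = cs.map pvSub := by
  simp [PySem.Chars.replace]
  exact pvReplaceGo cs cs.length [] le_rfl

theorem pvSplitGoAcc (s : List Char) : ∀ (cur : List Char) (acc : List (List Char)),
    PySem.Chars.split₀.go s cur acc = acc.reverse ++ PySem.Chars.split₀.go s cur [] := by
  induction s with
  | nil => intro cur acc; by_cases h : cur.isEmpty <;> simp [PySem.Chars.split₀.go, h]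
  | cons c r ih =>
    intro cur acc
    simp only [PySem.Chars.split₀.go]
    by_cases hs : PySem.Chars.isspace c = true
    · simp only [if_pos hs]
      by_cases hc : cur.isEmpty
      · simp only [if_pos hc]
        exact ih [] acc
      · simp only [if_neg hc]
        rw [ih [] (cur.reverse :: acc), ih [] [cur.reverse]]
        simp
    · simp only [if_neg hs]
      exact ih (c :: cur) acc

theorem pvIsspaceSub (c : Char) :
    PySem.Chars.isspace (pvSub c) = (c == '_' || PySem.Chars.isspace c) := by
  by_cases h : c = '_'
  · subst h; decide
  · have hb : (c == '_') = false := by simp [h]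
    rw [pvSub, if_neg h, hb, Bool.false_or]

theorem pvCapAppend (u : List Char) (c : Char) :
    pvCap (u ++ [c]) = pvCap u ++
      (if PySem.Chars.isalnum c then
        [if (u.filter PySem.Chars.isalnum).isEmpty then PySem.Chars.upperChar c
         else PySem.Chars.lowerChar c] else []) := by
  by_cases ha : PySem.Chars.isalnum c
  · cases hf : u.filter PySem.Chars.isalnum with
    | nil => simp [pvCap, List.filter_append, hf, ha, PySem.Chars.lower]
    | cons d ds => simp [pvCap, List.filter_append, hf, ha, PySem.Chars.lower]
  · simp [pvCap, List.filter_append, ha]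

theorem pvMain (cs : List Char) : ∀ (cur : List Char),
    List.flatMap pvCap (PySem.Chars.split₀.go (cs.map pvSub) cur []) =
      pvCap cur.reverse ++ pvScan (cur.filter PySem.Chars.isalnum).isEmpty cs := by
  induction cs with
  | nil =>
    intro cur
    by_cases h : cur.isEmpty
    · have : cur = [] := by simpa [List.isEmpty_iff] using h
      simp [this, PySem.Chars.split₀.go, pvScan, pvCap, PySem.Chars.lower]
    · simp [PySem.Chars.split₀.go, h, pvScan]
  | cons c r ih =>
    intro cur
    simp only [List.map_cons, PySem.Chars.split₀.go, pvIsspaceSub]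
    by_cases hd : (c == '_' || PySem.Chars.isspace c) = true
    · rw [if_pos hd]
      by_cases hc : cur.isEmpty
      · have hc' : cur = [] := by simpa [List.isEmpty_iff] using hc
        rw [if_pos hc]
        simpa [hc', pvScan, hd, pvCap] using ih []
      · rw [if_neg hc, pvSplitGoAcc]
        simp only [List.flatMap_append, ih []]
        simp [pvScan, hd, pvCap, PySem.Chars.lower]
    · rw [if_neg hd]
      have hsub : pvSub c = c := by
        have : ¬ c = '_' := by
          intro h; subst h; simp at hd
        simp [pvSub, this]
      rw [hsub, ih (c :: cur)]
      have hrev : (c :: cur).reverse = cur.reverse ++ [c] := by simp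
      rw [hrev, pvCapAppend]
      rw [Bool.not_eq_true] at hd
      by_cases ha : PySem.Chars.isalnum c
      · simp [pvScan, hd, ha, List.append_assoc]
      · simp [pvScan, hd, ha]

theorem pvFoldB (cs : List Char) : ∀ (out : List Char) (start : Bool),
    (cs.foldl (fun (st : List Char × Bool) c =>
      if c == '_' || PySem.Chars.isspace c then (st.1, true)
      else if PySem.Chars.isalnum c then
        (st.1 ++ [if st.2 then PySem.Chars.upperChar c else PySem.Chars.lowerChar c], false)
      else st) (out, start)).1 = out ++ pvScan start cs := by
  induction cs with
  | nil => intro out start; simp [pvScan]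
  | cons c r ih =>
    intro out start
    simp only [List.foldl_cons]
    by_cases hd : (c == '_' || PySem.Chars.isspace c) = true
    · rw [if_pos hd, ih]
      simp [pvScan, hd]
    · rw [if_neg hd]
      by_cases ha : PySem.Chars.isalnum c = true
      · rw [if_pos ha, ih]
        simp [pvScan, hd, ha]
      · rw [if_neg ha, ih]
        simp [pvScan, hd, ha]

/-- A's parts-building foldl characterized. -/
def pvG (p : List Char) : Option (List Char) :=
  if (p.filter PySem.Chars.isalnum).isEmpty then none else some (pvCap p)

theorem pvStep (acc : List (List Char)) (p : List Char) :
    (let clean := p.filter PySem.Chars.isalnum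
     if clean.isEmpty then acc
     else acc ++ [(clean.take 1).map PySem.Chars.upperChar ++ PySem.Chars.lower (clean.drop 1)])
      = acc ++ (pvG p).toList := by
  by_cases h : (p.filter PySem.Chars.isalnum).isEmpty
  · simp [h, pvG]
  · simp [h, pvG, pvCap]

theorem pvFoldA' (l : List (List Char)) : ∀ (acc : List (List Char)),
    l.foldl (fun acc p => acc ++ (pvG p).toList) acc = acc ++ l.filterMap pvG := by
  induction l with
  | nil => intro acc; simp
  | cons p t ih =>
    intro acc
    simp only [List.foldl_cons, List.filterMap_cons]
    cases h : pvG p with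
    | none => simp [ih]
    | some w => simp [ih]

theorem pvFoldA (l : List (List Char)) : ∀ (acc : List (List Char)),
    l.foldl (fun acc part =>
        let clean := part.filter PySem.Chars.isalnum
        if clean.isEmpty then acc
        else acc ++ [(clean.take 1).map PySem.Chars.upperChar ++ PySem.Chars.lower (clean.drop 1)]) acc
      = acc ++ l.filterMap pvG := by
  intro acc
  rw [List.foldl_ext (g := fun acc p => acc ++ (pvG p).toList)
    (H := fun a b _ => pvStep a b)]
  exact pvFoldA' l acc

theorem pvCapOfG_none (p : List Char) (h : pvG p = none) : pvCap p = [] := by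
  unfold pvG at h
  by_cases he : (p.filter PySem.Chars.isalnum).isEmpty
  · have hz : p.filter PySem.Chars.isalnum = [] := by simpa [List.isEmpty_iff] using he
    simp [pvCap, hz, PySem.Chars.lower]
  · simp [he] at h

theorem pvCapOfG_some (p w : List Char) (h : pvG p = some w) : pvCap p = w := by
  unfold pvG at h
  by_cases he : (p.filter PySem.Chars.isalnum).isEmpty
  · simp [he] at h
  · simpa [he] using h

theorem pvFlattenFilterMap (l : List (List Char)) :
    (l.filterMap pvG).flatten = l.flatMap pvCap := by
  induction l with
  | nil => simp
  | cons p t ih =>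
    cases h : pvG p with
    | none =>
      simp only [List.filterMap_cons, List.flatMap_cons, h]
      rw [pvCapOfG_none p h, ih]
      simp
    | some w =>
      simp only [List.filterMap_cons, List.flatMap_cons, h, List.flatten_cons]
      rw [pvCapOfG_some p w h, ih]

theorem pvGNonempty (p w : List Char) (h : pvG p = some w) : w ≠ [] := by
  unfold pvG at h
  by_cases he : (p.filter PySem.Chars.isalnum).isEmpty
  · simp [he] at h
  · cases hf : p.filter PySem.Chars.isalnum with
    | nil => simp [hf] at he
    | cons d ds =>
      simp [he] at h
      rw [← h]
      simp [pvCap, hf]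

theorem pvPartsEmptyIff (l : List (List Char)) :
    (l.filterMap pvG).isEmpty = (l.flatMap pvCap).isEmpty := by
  rw [← pvFlattenFilterMap]
  cases hp : l.filterMap pvG with
  | nil => simp
  | cons w ws =>
    have hmem : w ∈ l.filterMap pvG := by rw [hp]; simp
    obtain ⟨p, _, hpg⟩ := List.mem_filterMap.mp hmem
    have hw := pvGNonempty p w hpg
    cases w with
    | nil => exact absurd rfl hw
    | cons a as => simp

theorem pvJoinFlatten (l : List (List Char)) : PySem.Chars.join [] l = l.flatten := by
  simp [PySem.Chars.join, List.intercalate]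
  induction l with
  | nil => simp
  | cons p t ih =>
    cases t with
    | nil => simp
    | cons q u => simp_all [List.intersperse]

theorem pvStripAllSpace (cs : List Char) (h : PySem.Chars.strip cs = []) :
    ∀ c ∈ cs, PySem.Chars.isspace c = true := by
  intro c hc
  unfold PySem.Chars.strip PySem.Chars.rstrip PySem.Chars.lstrip at h
  have h1 : List.dropWhile PySem.Chars.isspace ((List.dropWhile PySem.Chars.isspace cs).reverse) = [] := by
    simpa using congrArg List.reverse h
  rw [List.dropWhile_eq_nil_iff] at h1
  by_cases h2 : c ∈ List.dropWhile PySem.Chars.isspace cs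
  · exact h1 c (by simpa using h2)
  · -- c is in the dropped-while prefix
    have : cs = List.takeWhile PySem.Chars.isspace cs ++ List.dropWhile PySem.Chars.isspace cs :=
      (List.takeWhile_append_dropWhile).symm
    rw [this] at hc
    rcases List.mem_append.mp hc with h3 | h3
    · exact List.mem_takeWhile_imp h3
    · exact absurd h3 h2

theorem pvScanAllSpace (cs : List Char) (h : ∀ c ∈ cs, PySem.Chars.isspace c = true) :
    ∀ start, pvScan start cs = [] := by
  induction cs with
  | nil => intro start; simp [pvScan]
  | cons c r ih =>
    intro start
    have hc := h c (by simp)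
    simp only [pvScan, hc, Bool.or_true, if_pos]
    exact ih (fun c hc => h c (by simp [hc])) true

/-- Core identity: A's clean_name list equals B's scanned list. -/
theorem pvCore (cs : List Char) :
    ((PySem.Chars.split₀ (PySem.Chars.replace cs ['_'] [' '])).filterMap pvG).flatten
      = pvScan true cs := by
  rw [pvFlattenFilterMap, pvReplaceEq]
  have := pvMain cs []
  simpa [PySem.Chars.split₀, pvCap] using this

-- ===== VERDICT (by name: the statement is the Claim_ definition above) =====
theorem normalize_agent_name_spec : Claim_equal_normalize_agent_name := by
  intro name _
  unfold Spec_normalize_agent_name normalize_agent_name normalize_agent_name_alt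
  simp only [pvFoldB name.toList [] true, List.nil_append, pvFoldA, pvJoinFlatten]
  set cs := name.toList with hcs
  set parts := (PySem.Chars.split₀ (PySem.Chars.replace cs ['_'] [' '])).filterMap pvG with hparts
  have hcore : parts.flatten = pvScan true cs := pvCore cs
  have hpe : parts.isEmpty = (pvScan true cs).isEmpty := by
    conv_lhs => rw [hparts]
    rw [pvPartsEmptyIff, ← pvFlattenFilterMap, ← hparts, hcore]
  by_cases hS : (pvScan true cs).isEmpty = true
  · rw [if_pos hS]
    by_cases hstrip : PySem.Str.strip name = ""
    · rw [if_pos hstrip]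
    · rw [if_neg hstrip, if_pos (hpe.trans hS)]
  · rw [if_neg hS]
    have hstrip : ¬ PySem.Str.strip name = "" := by
      intro h
      have hall : ∀ c ∈ cs, PySem.Chars.isspace c = true := by
        apply pvStripAllSpace
        simpa [hcs] using congrArg String.toList h
      exact hS (by rw [pvScanAllSpace cs hall true]; rfl)
    rw [if_neg hstrip, if_neg (by rw [hpe]; exact hS)]
    rw [hcore]
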